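-- pv_equiv track=rewrite | github.com/Zomberep/Grasshopper-Luffa- | main.py | SubCrumb
-- ===== SOURCE A (Python) =====
-- blocks_for_subcrumb = ['0111', '1101', '1011', '1010', '1100', '0100', '1000', '0011', '0101', '1111', '0110', '0000', '1001', '0001', '0010', '1110']
--
-- def Trans(a): # переводит массив байт в строку соответствующего числа бит
--     result = ''
--     for number in a:
--         curr_byte = bin(number)[2:]
--         result += ('0'*(8-len(curr_byte)) + curr_byte)
--     return result
--
-- def MegaTrans(words):
--     return [Trans(x) for x in words]
--
-- def opp_Trans(a): # переводит 32-символьную строку в массив из 4 байт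
--     result = []
--     for i in range(4):
--         curr = a[i*8:i*8+8]
--         result.append(int(curr, 2))
--     return result
--
-- def SubCrumb(a): # a - список из 4-ёх 4-байтовых списков
--     a = MegaTrans(a)
--     new_a = ['' for _ in range(4)]
--     for l in range(32):
--         number_of_block = int(a[3][l] + a[2][l] + a[1][l] + a[0][l], 2)
--         curr_block = blocks_for_subcrumb[number_of_block]
--         for j in range(3, -1, -1):
--             new_a[j] += curr_block[3-j]
--     return [opp_Trans(x) for x in new_a]
-- ===== SOURCE B (Python) =====
-- # Bitsliced re-implementation: the crumb S-box is evaluated as fixed boolean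
-- # (XOR/AND) formulas (its algebraic normal form) applied to whole 32-bit words
-- # at once -- no per-bit-position loop and no lookup table at runtime.
-- MASK = 0xFFFFFFFF
--
-- def SubCrumb(a):
--     w0, w1, w2, w3 = [r[0] << 24 | r[1] << 16 | r[2] << 8 | r[3] for r in a[:4]]
--     ab = w0 & w1
--     e = (w1 ^ ab ^ w2) & w3
--     y0 = MASK ^ ab ^ w2 ^ e
--     y1 = y0 ^ w0 ^ (w0 & w2) ^ w3
--     y2 = MASK ^ w1 ^ e
--     y3 = w0 ^ w1 ^ ab ^ w2 ^ (w1 & w2) ^ (ab & w2) ^ (w1 & w3)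
--     return [[y >> 24 & 255, y >> 16 & 255, y >> 8 & 255, y & 255]
--             for y in (y0, y1, y2, y3)]
-- ===== Notes on version B (the rewrite author's own statement) =====
-- stated objective: alternative
-- what changed: Replaces the per-bit-position loop with a table lookup by a loop-free, table-free bitsliced evaluation: the crumb S-box is rewritten as fixed XOR/AND boolean formulas (its algebraic normal form) applied to the four packed 32-bit words at once, so all 32 substitutions happen in a handful of word-wide bit operations.
import Mathlib
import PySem

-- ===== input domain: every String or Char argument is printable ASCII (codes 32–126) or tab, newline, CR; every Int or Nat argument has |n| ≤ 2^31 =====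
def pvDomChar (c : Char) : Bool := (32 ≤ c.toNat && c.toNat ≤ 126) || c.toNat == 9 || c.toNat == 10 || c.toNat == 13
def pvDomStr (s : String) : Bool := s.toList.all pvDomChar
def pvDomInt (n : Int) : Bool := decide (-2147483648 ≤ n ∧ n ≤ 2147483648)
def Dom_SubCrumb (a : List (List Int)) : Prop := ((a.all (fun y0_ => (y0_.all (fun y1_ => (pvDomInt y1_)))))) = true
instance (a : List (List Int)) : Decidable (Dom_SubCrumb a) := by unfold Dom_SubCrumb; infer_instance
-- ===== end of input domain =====

-- B drops A's 32-iteration bit-string loop and table lookup entirely: the crumb S-box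
-- is evaluated as fixed XOR/AND boolean formulas (its algebraic normal form) applied
-- bitwise to the four packed 32-bit words at once.

-- ===== PORT A =====

-- bin(n)[2:]: binary digits without the '0b' prefix (Nat.toDigits 2 matches Python's
-- bin for n ≥ 0, including bin(0)[2:] = '0'; for n < 0 the 'b…' remnant of bin(n)[2:]
-- is reproduced exactly, though Pre_ admits only 0 ≤ n)
def pyBin (n : Int) : List Char :=
  if 0 ≤ n then Nat.toDigits 2 n.toNat else 'b' :: Nat.toDigits 2 (-n).toNat

-- Trans: result += '0'*(8-len(curr_byte)) + curr_byte  ('0'*k is '' for k ≤ 0; Nat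
-- subtraction clamps at 0 the same way)
def TransA (row : List Int) : List Char :=
  row.foldl (fun result number =>
    result ++ (List.replicate (8 - (pyBin number).length) '0' ++ pyBin number)) []

def MegaTransA (words : List (List Int)) : List (List Char) := words.map TransA

-- int(s, 2): exact on the nonempty '0'/'1' strings that occur under Pre_
def parseBin (s : List Char) : Int :=
  s.foldl (fun acc c => 2 * acc + (if c = '1' then 1 else 0)) 0

-- opp_Trans: for i in range(4): result.append(int(a[i*8:i*8+8], 2))
def oppTransA (s : List Char) : List Int :=
  (List.range 4).foldl (fun result i => result ++ [parseBin ((s.drop (i * 8)).take 8)]) []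

def blocksA : List (List Char) :=
  [['0','1','1','1'], ['1','1','0','1'], ['1','0','1','1'], ['1','0','1','0'],
   ['1','1','0','0'], ['0','1','0','0'], ['1','0','0','0'], ['0','0','1','1'],
   ['0','1','0','1'], ['1','1','1','1'], ['0','1','1','0'], ['0','0','0','0'],
   ['1','0','0','1'], ['0','0','0','1'], ['0','0','1','0'], ['1','1','1','0']]

-- body of 'for l in range(32)': indexing by getD is exact here — Pre_ guarantees every
-- index is in range (Python would raise IndexError exactly where Pre_ fails)
def stepA (a' : List (List Char)) (na : List (List Char)) (l : Nat) : List (List Char) :=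
  let nb := parseBin [(a'.getD 3 []).getD l '0', (a'.getD 2 []).getD l '0',
                      (a'.getD 1 []).getD l '0', (a'.getD 0 []).getD l '0']
  let cb := blocksA.getD nb.toNat []
  -- for j in range(3, -1, -1): new_a[j] += curr_block[3-j]
  [3, 2, 1, 0].foldl (fun na j => na.set j ((na.getD j []) ++ [cb.getD (3 - j) '0'])) na

def SubCrumb (a : List (List Int)) : List (List Int) :=
  let a' := MegaTransA a
  let new_a := (List.range 32).foldl (stepA a') [[], [], [], []]
  new_a.map oppTransA

-- ===== PORT B =====

-- (r[0]<<24)|(r[1]<<16)|(r[2]<<8)|r[3]; .toNat is exact: Pre_ guarantees 0 ≤ r[i]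
def packB (r : List Int) : Nat :=
  ((r.getD 0 0).toNat <<< 24) ||| ((r.getD 1 0).toNat <<< 16) |||
  ((r.getD 2 0).toNat <<< 8) ||| (r.getD 3 0).toNat

-- y >> 24 & 255, y >> 16 & 255, y >> 8 & 255, y & 255
def unpackB (y : Nat) : List Int :=
  [((y >>> 24) &&& 255 : Nat), ((y >>> 16) &&& 255 : Nat), ((y >>> 8) &&& 255 : Nat), (y &&& 255 : Nat)]

-- w0, w1, w2, w3 = [... for r in a[:4]]  (Python raises ValueError unless exactly 4
-- rows; Pre_ guarantees 4, the [] branch is unreachable under Pre_)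
def SubCrumb_alt (a : List (List Int)) : List (List Int) :=
  match (a.take 4).map packB with
  | [w0, w1, w2, w3] =>
    let ab := w0 &&& w1
    let e := (w1 ^^^ ab ^^^ w2) &&& w3
    let y0 := 4294967295 ^^^ ab ^^^ w2 ^^^ e
    let y1 := y0 ^^^ w0 ^^^ (w0 &&& w2) ^^^ w3
    let y2 := 4294967295 ^^^ w1 ^^^ e
    let y3 := w0 ^^^ w1 ^^^ ab ^^^ w2 ^^^ (w1 &&& w2) ^^^ (ab &&& w2) ^^^ (w1 &&& w3)
    [y0, y1, y2, y3].map unpackB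
  | _ => []

-- ===== PRECONDITION & SPEC =====
-- Pre_ is the function's natural domain: the 4×4 block actually used — the first 4
-- entries of the first 4 rows are bytes (extra rows/entries are never read by either
-- program). Outside it A either raises (short rows / negative bytes put a 'b' or an
-- out-of-range index under int(·,2) / a[3][l]) or, for bytes ≥ 256, returns a value
-- produced by misaligned bit-string concatenation, which B does not reproduce.
def Pre_SubCrumb (a : List (List Int)) : Prop :=
  4 ≤ a.length ∧ ∀ r ∈ a.take 4, 4 ≤ r.length ∧ ∀ x ∈ r.take 4, 0 ≤ x ∧ x < 256
instance (a : List (List Int)) : Decidable (Pre_SubCrumb a) := by unfold Pre_SubCrumb; infer_instance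

def pvWitness_SubCrumb : List (List Int) :=
  [[0, 1, 2, 3], [4, 5, 6, 7], [8, 9, 10, 11], [252, 253, 254, 255]]

def Spec_SubCrumb (a : List (List Int)) (out : List (List Int)) : Prop := out = SubCrumb_alt a
instance (a : List (List Int)) (out : List (List Int)) : Decidable (Spec_SubCrumb a out) := by unfold Spec_SubCrumb; infer_instance

-- ===== CLAIM (what is proved, stated in full; the proofs are below) =====
def Claim_equal_SubCrumb : Prop :=
  ∀ (a : List (List Int)), Dom_SubCrumb a → Pre_SubCrumb a → Spec_SubCrumb a (SubCrumb a)

-- ===== LEMMAS AND PROOFS =====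

def bc (b : Bool) : Char := if b then '1' else '0'

-- the S-box as a table of ints, used only in the proof to name the boolean function
-- bit j of BLOCKS[x3 x2 x1 x0]
def tblB : List Nat := [7, 13, 11, 10, 12, 4, 8, 3, 5, 15, 6, 0, 9, 1, 2, 14]
def ybit (j : Nat) (b0 b1 b2 b3 : Bool) : Bool :=
  (tblB.getD (b3.toNat * 8 + b2.toNat * 4 + b1.toNat * 2 + b0.toNat) 0).testBit j

theorem hbyte (m i : Nat) (hm : m < 256) (hi : 8 ≤ i) : m.testBit i = false := by
  apply Nat.testBit_eq_false_of_lt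
  calc m < 256 := hm
    _ = 2 ^ 8 := rfl
    _ ≤ 2 ^ i := Nat.pow_le_pow_right (by norm_num) hi

theorem testBit_pack (n0 n1 n2 n3 p : Nat) (h1 : n1 < 256) (h2 : n2 < 256) (h3 : n3 < 256) :
    (n0 <<< 24 ||| n1 <<< 16 ||| n2 <<< 8 ||| n3).testBit p =
      if p < 8 then n3.testBit p
      else if p < 16 then n2.testBit (p - 8)
      else if p < 24 then n1.testBit (p - 16)
      else n0.testBit (p - 24) := by
  simp only [Nat.testBit_or, Nat.testBit_shiftLeft]
  split_ifs with c1 c2 c3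
  · simp [show ¬ 24 ≤ p by omega, show ¬ 16 ≤ p by omega, show ¬ 8 ≤ p by omega]
  · simp [show ¬ 24 ≤ p by omega, show ¬ 16 ≤ p by omega, show 8 ≤ p by omega,
          hbyte n3 p h3 (by omega)]
  · simp [show ¬ 24 ≤ p by omega, show 16 ≤ p by omega, show 8 ≤ p by omega,
          hbyte n3 p h3 (by omega), hbyte n2 (p-8) h2 (by omega)]
  · simp [show 24 ≤ p by omega, show 16 ≤ p by omega, show 8 ≤ p by omega,
          hbyte n3 p h3 (by omega), hbyte n2 (p-8) h2 (by omega), hbyte n1 (p-16) h1 (by omega)]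

set_option maxRecDepth 10000 in
theorem charA_pad' : ∀ m : Fin 256,
    List.replicate (8 - (pyBin ((m : Nat) : Int)).length) '0' ++ pyBin ((m : Nat) : Int)
      = [bc ((m:Nat).testBit 7), bc ((m:Nat).testBit 6), bc ((m:Nat).testBit 5), bc ((m:Nat).testBit 4),
         bc ((m:Nat).testBit 3), bc ((m:Nat).testBit 2), bc ((m:Nat).testBit 1), bc ((m:Nat).testBit 0)] := by decide

theorem charA_pad (n : Nat) (h : n < 256) :
    List.replicate (8 - (pyBin (n : Int)).length) '0' ++ pyBin (n : Int)
      = [bc (n.testBit 7), bc (n.testBit 6), bc (n.testBit 5), bc (n.testBit 4),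
         bc (n.testBit 3), bc (n.testBit 2), bc (n.testBit 1), bc (n.testBit 0)] := charA_pad' ⟨n, h⟩

theorem transA_shift (row : List Int) (init : List Char) :
    row.foldl (fun result number =>
        result ++ (List.replicate (8 - (pyBin number).length) '0' ++ pyBin number)) init
      = init ++ TransA row := by
  induction row generalizing init with
  | nil => simp [TransA]
  | cons x xs ih =>
    simp only [TransA, List.foldl_cons, List.nil_append]
    rw [ih, ih (List.replicate (8 - (pyBin x).length) '0' ++ pyBin x), List.append_assoc]

theorem transA_row (b0 b1 b2 b3 : Nat) (rest : List Int)
    (h0 : b0 < 256) (h1 : b1 < 256) (h2 : b2 < 256) (h3 : b3 < 256) :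
    TransA ((b0 : Int) :: (b1 : Int) :: (b2 : Int) :: (b3 : Int) :: rest)
      = bc (b0.testBit 7) :: bc (b0.testBit 6) :: bc (b0.testBit 5) :: bc (b0.testBit 4) :: bc (b0.testBit 3) :: bc (b0.testBit 2) :: bc (b0.testBit 1) :: bc (b0.testBit 0) :: bc (b1.testBit 7) :: bc (b1.testBit 6) :: bc (b1.testBit 5) :: bc (b1.testBit 4) :: bc (b1.testBit 3) :: bc (b1.testBit 2) :: bc (b1.testBit 1) :: bc (b1.testBit 0) :: bc (b2.testBit 7) :: bc (b2.testBit 6) :: bc (b2.testBit 5) :: bc (b2.testBit 4) :: bc (b2.testBit 3) :: bc (b2.testBit 2) :: bc (b2.testBit 1) :: bc (b2.testBit 0) :: bc (b3.testBit 7) :: bc (b3.testBit 6) :: bc (b3.testBit 5) :: bc (b3.testBit 4) :: bc (b3.testBit 3) :: bc (b3.testBit 2) :: bc (b3.testBit 1) :: bc (b3.testBit 0) :: TransA rest := by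
  simp only [TransA, List.foldl_cons]
  rw [transA_shift, ← TransA]
  simp only [List.nil_append, charA_pad b0 h0, charA_pad b1 h1, charA_pad b2 h2, charA_pad b3 h3]
  simp

def cA (a' : List (List Char)) (l j : Nat) : Char :=
  (blocksA.getD (parseBin [(a'.getD 3 []).getD l '0', (a'.getD 2 []).getD l '0',
      (a'.getD 1 []).getD l '0', (a'.getD 0 []).getD l '0']).toNat []).getD (3 - j) '0'

theorem stepA_eq (a' : List (List Char)) (x0 x1 x2 x3 : List Char) (l : Nat) :
    stepA a' [x0, x1, x2, x3] l
      = [x0 ++ [cA a' l 0], x1 ++ [cA a' l 1], x2 ++ [cA a' l 2], x3 ++ [cA a' l 3]] := rfl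

theorem oppTransA_32 (c0 c1 c2 c3 c4 c5 c6 c7 c8 c9 c10 c11 c12 c13 c14 c15 c16 c17 c18 c19 c20 c21 c22 c23 c24 c25 c26 c27 c28 c29 c30 c31 : Char) :
    oppTransA [c0, c1, c2, c3, c4, c5, c6, c7, c8, c9, c10, c11, c12, c13, c14, c15, c16, c17, c18, c19, c20, c21, c22, c23, c24, c25, c26, c27, c28, c29, c30, c31]
      = [parseBin [c0, c1, c2, c3, c4, c5, c6, c7], parseBin [c8, c9, c10, c11, c12, c13, c14, c15], parseBin [c16, c17, c18, c19, c20, c21, c22, c23], parseBin [c24, c25, c26, c27, c28, c29, c30, c31]] := rfl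

theorem parse8 (c0 c1 c2 c3 c4 c5 c6 c7 : Char) :
    parseBin [c0, c1, c2, c3, c4, c5, c6, c7] =
      2 * (2 * (2 * (2 * (2 * (2 * (2 * (2 * 0 + (if c0 = '1' then (1:Int) else 0)) + (if c1 = '1' then (1:Int) else 0)) + (if c2 = '1' then (1:Int) else 0)) + (if c3 = '1' then (1:Int) else 0)) + (if c4 = '1' then (1:Int) else 0)) + (if c5 = '1' then (1:Int) else 0)) + (if c6 = '1' then (1:Int) else 0)) + (if c7 = '1' then (1:Int) else 0) := rfl

-- A's table lookup, as the boolean function ybit j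
theorem tableEq0 (x0 x1 x2 x3 : Bool) :
    (if (blocksA.getD (parseBin [bc x3, bc x2, bc x1, bc x0]).toNat []).getD 3 '0' = '1' then (1:Int) else 0)
      = ((ybit 0 x0 x1 x2 x3).toNat : Int) := by revert x0 x1 x2 x3; decide
theorem tableEq1 (x0 x1 x2 x3 : Bool) :
    (if (blocksA.getD (parseBin [bc x3, bc x2, bc x1, bc x0]).toNat []).getD 2 '0' = '1' then (1:Int) else 0)
      = ((ybit 1 x0 x1 x2 x3).toNat : Int) := by revert x0 x1 x2 x3; decide
theorem tableEq2 (x0 x1 x2 x3 : Bool) :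
    (if (blocksA.getD (parseBin [bc x3, bc x2, bc x1, bc x0]).toNat []).getD 1 '0' = '1' then (1:Int) else 0)
      = ((ybit 2 x0 x1 x2 x3).toNat : Int) := by revert x0 x1 x2 x3; decide
theorem tableEq3 (x0 x1 x2 x3 : Bool) :
    (if (blocksA.getD (parseBin [bc x3, bc x2, bc x1, bc x0]).toNat []).getD 0 '0' = '1' then (1:Int) else 0)
      = ((ybit 3 x0 x1 x2 x3).toNat : Int) := by revert x0 x1 x2 x3; decide

-- B-side: bytes of a word, by its bits
def hornerN (b7 b6 b5 b4 b3 b2 b1 b0 : Bool) : Nat :=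
  2 * (2 * (2 * (2 * (2 * (2 * (2 * (2 * 0 + b7.toNat) + b6.toNat) + b5.toNat) + b4.toNat) + b3.toNat) + b2.toNat) + b1.toNat) + b0.toNat

set_option maxRecDepth 10000 in
theorem byteN : ∀ n : Fin 256, (n : Nat) =
    hornerN ((n:Nat).testBit 7) ((n:Nat).testBit 6) ((n:Nat).testBit 5) ((n:Nat).testBit 4)
            ((n:Nat).testBit 3) ((n:Nat).testBit 2) ((n:Nat).testBit 1) ((n:Nat).testBit 0) := by decide

theorem byte_of_testBit (F s : Nat) :
    (F >>> s) &&& 255 = hornerN (F.testBit (s+7)) (F.testBit (s+6)) (F.testBit (s+5)) (F.testBit (s+4))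
                                (F.testBit (s+3)) (F.testBit (s+2)) (F.testBit (s+1)) (F.testBit s) := by
  have h : (F >>> s) &&& 255 < 256 := Nat.lt_succ_of_le Nat.and_le_right
  have hb := byteN ⟨_, h⟩
  rw [show ((⟨F >>> s &&& 255, h⟩ : Fin 256) : Nat) = F >>> s &&& 255 from rfl] at hb
  rw [hb]
  simp [Nat.testBit_and, Nat.testBit_shiftRight,
        show Nat.testBit 255 7 = true from rfl, show Nat.testBit 255 6 = true from rfl,
        show Nat.testBit 255 5 = true from rfl, show Nat.testBit 255 4 = true from rfl,
        show Nat.testBit 255 3 = true from rfl, show Nat.testBit 255 2 = true from rfl,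
        show Nat.testBit 255 1 = true from rfl]

theorem byte0_of_testBit (F : Nat) :
    F &&& 255 = hornerN (F.testBit 7) (F.testBit 6) (F.testBit 5) (F.testBit 4)
                        (F.testBit 3) (F.testBit 2) (F.testBit 1) (F.testBit 0) := by
  simpa using byte_of_testBit F 0

theorem mask_testBit (p : Nat) : (4294967295 : Nat).testBit p = decide (p < 32) := by
  rw [show (4294967295 : Nat) = 2 ^ 32 - 1 from rfl, Nat.testBit_two_pow_sub_one]

theorem bitY0 (w0 w1 w2 w3 p : Nat) (hp : p < 32) :
    (4294967295 ^^^ (w0 &&& w1) ^^^ w2 ^^^ ((w1 ^^^ (w0 &&& w1) ^^^ w2) &&& w3)).testBit p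
      = ybit 0 (w0.testBit p) (w1.testBit p) (w2.testBit p) (w3.testBit p) := by
  simp only [Nat.testBit_xor, Nat.testBit_and, mask_testBit, hp, decide_true]
  generalize w0.testBit p = b0; generalize w1.testBit p = b1
  generalize w2.testBit p = b2; generalize w3.testBit p = b3
  revert b0 b1 b2 b3; decide

theorem bitY1 (w0 w1 w2 w3 p : Nat) (hp : p < 32) :
    ((4294967295 ^^^ (w0 &&& w1) ^^^ w2 ^^^ ((w1 ^^^ (w0 &&& w1) ^^^ w2) &&& w3)) ^^^ w0 ^^^ (w0 &&& w2) ^^^ w3).testBit p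
      = ybit 1 (w0.testBit p) (w1.testBit p) (w2.testBit p) (w3.testBit p) := by
  simp only [Nat.testBit_xor, Nat.testBit_and, mask_testBit, hp, decide_true]
  generalize w0.testBit p = b0; generalize w1.testBit p = b1
  generalize w2.testBit p = b2; generalize w3.testBit p = b3
  revert b0 b1 b2 b3; decide

theorem bitY2 (w0 w1 w2 w3 p : Nat) (hp : p < 32) :
    (4294967295 ^^^ w1 ^^^ ((w1 ^^^ (w0 &&& w1) ^^^ w2) &&& w3)).testBit p
      = ybit 2 (w0.testBit p) (w1.testBit p) (w2.testBit p) (w3.testBit p) := by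
  simp only [Nat.testBit_xor, Nat.testBit_and, mask_testBit, hp, decide_true]
  generalize w0.testBit p = b0; generalize w1.testBit p = b1
  generalize w2.testBit p = b2; generalize w3.testBit p = b3
  revert b0 b1 b2 b3; decide

theorem bitY3 (w0 w1 w2 w3 p : Nat) :
    (w0 ^^^ w1 ^^^ (w0 &&& w1) ^^^ w2 ^^^ (w1 &&& w2) ^^^ ((w0 &&& w1) &&& w2) ^^^ (w1 &&& w3)).testBit p
      = ybit 3 (w0.testBit p) (w1.testBit p) (w2.testBit p) (w3.testBit p) := by
  simp only [Nat.testBit_xor, Nat.testBit_and]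
  generalize w0.testBit p = b0; generalize w1.testBit p = b1
  generalize w2.testBit p = b2; generalize w3.testBit p = b3
  revert b0 b1 b2 b3; decide

set_option maxHeartbeats 4000000 in
set_option maxRecDepth 100000 in
theorem core (n00 n01 n02 n03 n10 n11 n12 n13 n20 n21 n22 n23 n30 n31 n32 n33 : Nat)
    (t0 t1 t2 t3 : List Int) (rr : List (List Int))
    (h00 : n00 < 256) (h01 : n01 < 256) (h02 : n02 < 256) (h03 : n03 < 256)
    (h10 : n10 < 256) (h11 : n11 < 256) (h12 : n12 < 256) (h13 : n13 < 256)
    (h20 : n20 < 256) (h21 : n21 < 256) (h22 : n22 < 256) (h23 : n23 < 256)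
    (h30 : n30 < 256) (h31 : n31 < 256) (h32 : n32 < 256) (h33 : n33 < 256) :
    SubCrumb (((n00:Int) :: n01 :: n02 :: n03 :: t0) :: ((n10:Int) :: n11 :: n12 :: n13 :: t1)
        :: ((n20:Int) :: n21 :: n22 :: n23 :: t2) :: ((n30:Int) :: n31 :: n32 :: n33 :: t3) :: rr)
      = SubCrumb_alt (((n00:Int) :: n01 :: n02 :: n03 :: t0) :: ((n10:Int) :: n11 :: n12 :: n13 :: t1)
        :: ((n20:Int) :: n21 :: n22 :: n23 :: t2) :: ((n30:Int) :: n31 :: n32 :: n33 :: t3) :: rr) := by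
  have tp0 := fun p => testBit_pack n00 n01 n02 n03 p h01 h02 h03
  have tp1 := fun p => testBit_pack n10 n11 n12 n13 p h11 h12 h13
  have tp2 := fun p => testBit_pack n20 n21 n22 n23 p h21 h22 h23
  have tp3 := fun p => testBit_pack n30 n31 n32 n33 p h31 h32 h33
  rw [SubCrumb, SubCrumb_alt]
  rw [show List.range 32 = [0,1,2,3,4,5,6,7,8,9,10,11,12,13,14,15,16,17,18,19,20,21,22,23,24,25,26,27,28,29,30,31] from rfl]
  simp only [MegaTransA, List.take_succ_cons, List.take_zero, List.map_cons, List.map_nil,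
    transA_row n00 n01 n02 n03 t0 h00 h01 h02 h03,
    transA_row n10 n11 n12 n13 t1 h10 h11 h12 h13,
    transA_row n20 n21 n22 n23 t2 h20 h21 h22 h23,
    transA_row n30 n31 n32 n33 t3 h30 h31 h32 h33,
    List.foldl_cons, List.foldl_nil, stepA_eq,
    packB, List.getD_cons_succ, List.getD_cons_zero, Int.toNat_natCast]
  simp only [List.nil_append, List.cons_append]
  simp only [oppTransA_32, parse8, unpackB]
  simp only [cA, List.getD_cons_succ, List.getD_cons_zero, Nat.reduceSub,
    tableEq0, tableEq1, tableEq2, tableEq3]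
  simp only [byte0_of_testBit]
  simp only [Nat.testBit_shiftRight, Nat.reduceAdd]
  simp only [bitY0, bitY1, bitY2, bitY3, Nat.reduceLT]
  simp only [tp0, tp1, tp2, tp3, Nat.reduceLT, Nat.reduceSub, reduceIte]
  simp only [hornerN, List.cons.injEq, and_true]
  and_intros <;> (push_cast; rfl)

-- ===== VERDICT (by name: the statement is the Claim_ definition above) =====
theorem SubCrumb_spec : Claim_equal_SubCrumb := by
  intro a _hdom hpre
  obtain ⟨hlen, hrows⟩ := hpre
  obtain ⟨r0, r1, r2, r3, rr, rfl⟩ : ∃ r0 r1 r2 r3 rr, a = r0 :: r1 :: r2 :: r3 :: rr := by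
    rcases a with _ | ⟨r0, _ | ⟨r1, _ | ⟨r2, _ | ⟨r3, rest⟩⟩⟩⟩ <;> simp at hlen
    exact ⟨r0, r1, r2, r3, rest, rfl⟩
  have h0 := hrows r0 (by simp)
  have h1 := hrows r1 (by simp)
  have h2 := hrows r2 (by simp)
  have h3 := hrows r3 (by simp)
  obtain ⟨b00, b01, b02, b03, t0, rfl⟩ : ∃ x0 x1 x2 x3 t, r0 = x0 :: x1 :: x2 :: x3 :: t := by
    rcases r0 with _ | ⟨x0, _ | ⟨x1, _ | ⟨x2, _ | ⟨x3, t⟩⟩⟩⟩ <;> simp at h0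
    exact ⟨x0, x1, x2, x3, t, rfl⟩
  obtain ⟨b10, b11, b12, b13, t1, rfl⟩ : ∃ x0 x1 x2 x3 t, r1 = x0 :: x1 :: x2 :: x3 :: t := by
    rcases r1 with _ | ⟨x0, _ | ⟨x1, _ | ⟨x2, _ | ⟨x3, t⟩⟩⟩⟩ <;> simp at h1
    exact ⟨x0, x1, x2, x3, t, rfl⟩
  obtain ⟨b20, b21, b22, b23, t2, rfl⟩ : ∃ x0 x1 x2 x3 t, r2 = x0 :: x1 :: x2 :: x3 :: t := by
    rcases r2 with _ | ⟨x0, _ | ⟨x1, _ | ⟨x2, _ | ⟨x3, t⟩⟩⟩⟩ <;> simp at h2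
    exact ⟨x0, x1, x2, x3, t, rfl⟩
  obtain ⟨b30, b31, b32, b33, t3, rfl⟩ : ∃ x0 x1 x2 x3 t, r3 = x0 :: x1 :: x2 :: x3 :: t := by
    rcases r3 with _ | ⟨x0, _ | ⟨x1, _ | ⟨x2, _ | ⟨x3, t⟩⟩⟩⟩ <;> simp at h3
    exact ⟨x0, x1, x2, x3, t, rfl⟩
  have g00 := h0.2 b00 (by simp); have g01 := h0.2 b01 (by simp)
  have g02 := h0.2 b02 (by simp); have g03 := h0.2 b03 (by simp)
  have g10 := h1.2 b10 (by simp); have g11 := h1.2 b11 (by simp)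
  have g12 := h1.2 b12 (by simp); have g13 := h1.2 b13 (by simp)
  have g20 := h2.2 b20 (by simp); have g21 := h2.2 b21 (by simp)
  have g22 := h2.2 b22 (by simp); have g23 := h2.2 b23 (by simp)
  have g30 := h3.2 b30 (by simp); have g31 := h3.2 b31 (by simp)
  have g32 := h3.2 b32 (by simp); have g33 := h3.2 b33 (by simp)
  lift b00 to Nat using g00.1 with n00; lift b01 to Nat using g01.1 with n01
  lift b02 to Nat using g02.1 with n02; lift b03 to Nat using g03.1 with n03
  lift b10 to Nat using g10.1 with n10; lift b11 to Nat using g11.1 with n11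
  lift b12 to Nat using g12.1 with n12; lift b13 to Nat using g13.1 with n13
  lift b20 to Nat using g20.1 with n20; lift b21 to Nat using g21.1 with n21
  lift b22 to Nat using g22.1 with n22; lift b23 to Nat using g23.1 with n23
  lift b30 to Nat using g30.1 with n30; lift b31 to Nat using g31.1 with n31
  lift b32 to Nat using g32.1 with n32; lift b33 to Nat using g33.1 with n33
  show SubCrumb _ = SubCrumb_alt _
  exact core n00 n01 n02 n03 n10 n11 n12 n13 n20 n21 n22 n23 n30 n31 n32 n33 t0 t1 t2 t3 rr
    (by exact_mod_cast g00.2) (by exact_mod_cast g01.2) (by exact_mod_cast g02.2) (by exact_mod_cast g03.2)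
    (by exact_mod_cast g10.2) (by exact_mod_cast g11.2) (by exact_mod_cast g12.2) (by exact_mod_cast g13.2)
    (by exact_mod_cast g20.2) (by exact_mod_cast g21.2) (by exact_mod_cast g22.2) (by exact_mod_cast g23.2)
    (by exact_mod_cast g30.2) (by exact_mod_cast g31.2) (by exact_mod_cast g32.2) (by exact_mod_cast g33.2)
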